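-- pv_equiv track=rewrite | github.com/fab-jul/fjcommon | fjcommon/iterable_ext.py | flag_first
-- ===== SOURCE A (Python) =====
-- def flag_first(it):
--     """
--     :returns: an iterator yielding tuples (first, el), where first is True for the first element and False
--     otherwise.
--     """
--     it = iter(it)
--     try:
--         first_el = next(it)
--         yield True, first_el
--     except StopIteration:
--         return
--     for el in it:
--         yield False, el
-- ===== SOURCE B (Python) =====
-- def flag_first(it):
--     """
--     :returns: an iterator yielding tuples (first, el), where first is True for the first element and False
--     otherwise.
--     """
--     lst = list(it)
--     flags = [True] * min(len(lst), 1) + [False] * max(len(lst) - 1, 0)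
--     return zip(flags, lst)
-- ===== Notes on version B (the rewrite author's own statement) =====
-- stated objective: alternative
-- what changed: Replaces A's lazy head-extraction generator (try/next + tail loop) with staged passes: materialize the input, build the whole flag list [True]+[False]*(n-1) up front, and zip it with the elements; note B is eager while A is a lazy generator (return value as a sequence is identical).
import Mathlib
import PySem

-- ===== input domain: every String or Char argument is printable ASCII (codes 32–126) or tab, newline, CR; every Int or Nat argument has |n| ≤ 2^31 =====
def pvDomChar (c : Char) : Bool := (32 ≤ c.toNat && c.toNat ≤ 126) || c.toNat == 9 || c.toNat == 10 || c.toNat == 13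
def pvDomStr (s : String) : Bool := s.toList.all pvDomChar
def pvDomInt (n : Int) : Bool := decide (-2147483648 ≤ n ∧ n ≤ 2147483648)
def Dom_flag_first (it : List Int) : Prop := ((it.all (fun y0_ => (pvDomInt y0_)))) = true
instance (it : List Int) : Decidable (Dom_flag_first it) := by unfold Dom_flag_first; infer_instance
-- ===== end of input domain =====

-- B builds the flag list up front and zips it with the elements instead of A's head-extraction + tail loop
-- (objective: alternative). B is eager where A is a lazy generator; the returned sequence is identical.

-- ===== PORT A =====
-- A: next(it) (StopIteration on empty → return), yield (True, first), then loop yielding (False, el).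
def flag_first (it : List Int) : List (Bool × Int) :=
  match it with
  | [] => []
  | first_el :: rest =>
      (true, first_el) :: rest.foldl (fun acc el => acc ++ [(false, el)]) []

-- ===== PORT B =====
-- B: staged — compute the whole flag list [True]*min(n,1) ++ [False]*max(n-1,0), then zip with the list.
def flag_first_alt (it : List Int) : List (Bool × Int) :=
  let flags := List.replicate (min it.length 1) true ++ List.replicate (it.length - 1) false
  flags.zip it

-- ===== PRECONDITION & SPEC =====
def Spec_flag_first (it : List Int) (out : List (Bool × Int)) : Prop := out = flag_first_alt it
instance (it : List Int) (out : List (Bool × Int)) : Decidable (Spec_flag_first it out) := by unfold Spec_flag_first; infer_instance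

-- ===== CLAIM (what is proved, stated in full; the proofs are below) =====
def Claim_equal_flag_first : Prop := ∀ (it : List Int), Dom_flag_first it → Spec_flag_first it (flag_first it)

-- ===== LEMMAS AND PROOFS =====

theorem pv_foldl_append (l : List Int) (acc : List (Bool × Int)) :
    l.foldl (fun acc el => acc ++ [(false, el)]) acc = acc ++ l.map (fun el => (false, el)) := by
  induction l generalizing acc with
  | nil => simp
  | cons h t ih => simp [List.foldl, ih]

theorem pv_zip_replicate_false (l : List Int) :
    (List.replicate l.length false).zip l = l.map (fun el => (false, el)) := by
  induction l with
  | nil => simp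
  | cons h t ih => simp [List.replicate, ih]

-- ===== VERDICT (by name: the statement is the Claim_ definition above) =====
theorem flag_first_spec : Claim_equal_flag_first := by
  intro it _
  unfold Spec_flag_first flag_first flag_first_alt
  cases it with
  | nil => simp
  | cons h t =>
      simp only [List.length_cons, pv_foldl_append]
      
      simp [pv_zip_replicate_false]
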